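-- pv_equiv track=rewrite | github.com/CandyZ93/Python_Work | function_list.py | make_grater
-- ===== SOURCE A (Python) =====
-- def make_grater(magicians):
-- 	tempMagis = []
-- 	while magicians:
-- 		tempMagis.append("the greter " + magicians.pop())
-- 	tempMagis.reverse()
-- 	for magi in tempMagis:
-- 		magicians.append(magi)
-- 	return magicians
-- ===== SOURCE B (Python) =====
-- def make_grater(magicians):
--     for i in range(len(magicians)):
--         magicians[i] = "the greter " + magicians[i]
--     return magicians
-- ===== Notes on version B (the rewrite author's own statement) =====
-- stated objective: simpler
-- what changed: Replaces the drain-with-pop / reverse / re-append pipeline through a temporary list by a single index walk that mutates each slot in place, avoiding the temp list and both extra traversals.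
import Mathlib
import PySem

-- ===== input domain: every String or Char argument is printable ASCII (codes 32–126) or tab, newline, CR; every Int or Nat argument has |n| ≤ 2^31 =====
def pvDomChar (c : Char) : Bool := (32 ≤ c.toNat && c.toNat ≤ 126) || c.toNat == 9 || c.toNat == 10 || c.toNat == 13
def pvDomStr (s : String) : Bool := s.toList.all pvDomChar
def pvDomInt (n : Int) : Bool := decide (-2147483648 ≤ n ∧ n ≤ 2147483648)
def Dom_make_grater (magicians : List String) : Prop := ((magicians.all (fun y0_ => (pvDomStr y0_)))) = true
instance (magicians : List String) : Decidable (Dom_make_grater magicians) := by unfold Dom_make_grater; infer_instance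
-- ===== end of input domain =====

-- B replaces A's pop-into-temp / reverse / re-append pipeline by one index walk mutating each
-- slot in place (simpler); both mutate the argument list, the theorem is about the return value.

-- ===== PORT A =====
-- while magicians: tempMagis.append("the greter " + magicians.pop())
def make_grater_while (magicians tempMagis : List String) : List String :=
  match h : magicians with
  | [] => tempMagis
  | _ :: _ =>
    make_grater_while magicians.dropLast
      (tempMagis ++ ["the greter " ++ magicians.getLast (by simp [h])])
termination_by magicians.length
decreasing_by simp [h, List.length_dropLast]

def make_grater (magicians : List String) : List String :=
  let tempMagis := make_grater_while magicians []
  -- tempMagis.reverse(); then for magi in tempMagis: magicians.append(magi)  (magicians is now empty)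
  tempMagis.reverse.foldl (fun acc magi => acc ++ [magi]) []

-- ===== PORT B =====
-- for i in range(len(magicians)): magicians[i] = "the greter " + magicians[i]
def make_grater_alt (magicians : List String) : List String :=
  (List.range magicians.length).foldl
    (fun acc i => acc.set i ("the greter " ++ acc.getD i "")) magicians

-- ===== PRECONDITION & SPEC =====
def Spec_make_grater (magicians : List String) (out : List String) : Prop := out = make_grater_alt magicians
instance (magicians : List String) (out : List String) : Decidable (Spec_make_grater magicians out) := by unfold Spec_make_grater; infer_instance

-- ===== CLAIM (what is proved, stated in full; the proofs are below) =====
def Claim_equal_make_grater : Prop := ∀ (magicians : List String), Dom_make_grater magicians → Spec_make_grater magicians (make_grater magicians)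

-- ===== LEMMAS AND PROOFS =====
theorem make_grater_while_eq (magicians : List String) : ∀ tempMagis,
    make_grater_while magicians tempMagis =
      tempMagis ++ (magicians.map (fun s => "the greter " ++ s)).reverse := by
  induction magicians using List.reverseRecOn with
  | nil => intro t; simp [make_grater_while]
  | append_singleton as a ih =>
    intro t
    rw [make_grater_while.eq_def]
    split
    · simp_all
    · rw [List.dropLast_concat, ih]
      simp

theorem alt_loop_eq (suf : List String) : ∀ pre : List String,
    (List.range' pre.length suf.length).foldl
      (fun acc i => acc.set i ("the greter " ++ acc.getD i "")) (pre ++ suf)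
      = pre ++ suf.map (fun s => "the greter " ++ s) := by
  induction suf with
  | nil => intro pre; simp
  | cons x rest ih =>
    intro pre
    rw [List.length_cons, List.range'_succ, List.foldl_cons]
    have hget : (pre ++ x :: rest).getD pre.length "" = x := by
      simp [List.getD]
    have hset : (pre ++ x :: rest).set pre.length ("the greter " ++ x)
        = (pre ++ ["the greter " ++ x]) ++ rest := by
      rw [List.set_append_right _ _ (le_refl _)]
      simp
    rw [hget, hset]
    have := ih (pre ++ ["the greter " ++ x])
    simp only [List.length_append, List.length_cons, List.length_nil] at this ⊢
    simpa using this

theorem make_grater_alt_eq (magicians : List String) :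
    make_grater_alt magicians = magicians.map (fun s => "the greter " ++ s) := by
  have := alt_loop_eq magicians []
  simpa [make_grater_alt, List.range_eq_range'] using this

-- ===== VERDICT (by name: the statement is the Claim_ definition above) =====
theorem make_grater_spec : Claim_equal_make_grater := by
  intro magicians _
  unfold Spec_make_grater make_grater
  rw [make_grater_while_eq, make_grater_alt_eq, PySem.List.foldl_append_singleton_eq_self]
  simp
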